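-- pv_equiv track=rewrite | github.com/vbuzovsky/RT-shape-detector | utils.py | split_history
-- ===== SOURCE A (Python) =====
-- def split_history(history: list) -> list:
--     segments = []
--     segment = []
--
--     none_count = 0
--     for pt in history:
--         if pt[-1] is None:
--             none_count += 1
--         else:
--             if none_count > 10: # arbitrary number, if there are more than 10 None values, it is probably due to overlapping shapes, so we split the history
--                 if segment:
--                     segments.append(segment)
--                 segment = []
--             none_count = 0
--             segment.append(pt)
--
--     if segment:
--         segments.append(segment)
--
--     return segments
-- ===== SOURCE B (Python) =====
-- from itertools import groupby
--
-- def split_history(history: list) -> list: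
--     segments = []
--     segment = []
--     for is_gap, run in groupby(history, key=lambda pt: pt[-1] is None):
--         pts = list(run)
--         if is_gap:
--             if len(pts) > 10 and segment:
--                 segments.append(segment)
--                 segment = []
--         else:
--             segment.extend(pts)
--     if segment:
--         segments.append(segment)
--     return segments
-- ===== Notes on version B (the rewrite author's own statement) =====
-- stated objective: idiomatic
-- what changed: B replaces A's per-element none_count bookkeeping with an itertools.groupby pass over maximal runs of None/non-None points, flushing the pending segment on a gap run longer than 10.
import Mathlib
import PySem

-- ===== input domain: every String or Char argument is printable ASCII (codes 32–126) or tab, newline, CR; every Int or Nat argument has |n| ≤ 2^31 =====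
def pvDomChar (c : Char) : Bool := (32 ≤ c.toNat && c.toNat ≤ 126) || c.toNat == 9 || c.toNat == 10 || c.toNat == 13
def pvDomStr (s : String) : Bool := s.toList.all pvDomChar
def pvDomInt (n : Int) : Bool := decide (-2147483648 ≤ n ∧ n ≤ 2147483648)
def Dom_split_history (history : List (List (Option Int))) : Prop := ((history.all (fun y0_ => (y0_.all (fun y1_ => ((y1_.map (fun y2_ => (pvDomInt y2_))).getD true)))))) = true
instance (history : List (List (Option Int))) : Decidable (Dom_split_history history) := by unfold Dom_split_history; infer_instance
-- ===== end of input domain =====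

-- B replaces A's per-element none_count bookkeeping by an itertools.groupby-style pass over
-- maximal runs of None / non-None points (objective: idiomatic); same return value on Pre_.

-- ===== PORT A =====
-- loop body of A's for-loop; state = (segments, segment, none_count)
def pvStepA (st : List (List (List (Option Int))) × List (List (Option Int)) × Int)
    (pt : List (Option Int)) :
    List (List (List (Option Int))) × List (List (Option Int)) × Int :=
  if PySem.List.pyGet? pt (-1) == some none then
    (st.1, st.2.1, st.2.2 + 1)
  else
    let p :=
      if st.2.2 > 10 then
        ((if st.2.1.isEmpty then st.1 else st.1 ++ [st.2.1]), ([] : List (List (Option Int))))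
      else (st.1, st.2.1)
    (p.1, p.2 ++ [pt], 0)

-- A's trailing 'if segment: segments.append(segment)'
def pvFinishA (st : List (List (List (Option Int))) × List (List (Option Int)) × Int) :
    List (List (List (Option Int))) :=
  if st.2.1.isEmpty then st.1 else st.1 ++ [st.2.1]

def split_history (history : List (List (Option Int))) : List (List (List (Option Int))) :=
  pvFinishA (history.foldl pvStepA ([], [], 0))

-- ===== PORT B =====
-- the groupby key: pt[-1] is None (pt = [] would raise in Python; excluded by Pre_)
def pvIsGap (pt : List (Option Int)) : Bool := PySem.List.pyGet? pt (-1) == some none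

-- B's for-loop over the groupby runs: peel the maximal leading run, handle it, recurse
def pvGroupGo (segments : List (List (List (Option Int)))) (segment : List (List (Option Int))) :
    List (List (Option Int)) → List (List (List (Option Int)))
  | [] => if segment.isEmpty then segments else segments ++ [segment]
  | pt :: rest =>
    let k := pvIsGap pt
    let run := pt :: rest.takeWhile (fun q => pvIsGap q == k)
    let rest' := rest.dropWhile (fun q => pvIsGap q == k)
    if k then
      if run.length > 10 && !segment.isEmpty then pvGroupGo (segments ++ [segment]) [] rest'
      else pvGroupGo segments segment rest'
    else pvGroupGo segments (segment ++ run) rest'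
  termination_by l => l.length
  decreasing_by all_goals
    exact Nat.lt_succ_of_le (List.Sublist.length_le (List.dropWhile_sublist _))

def split_history_alt (history : List (List (Option Int))) : List (List (List (Option Int))) :=
  pvGroupGo [] [] history

-- ===== PRECONDITION & SPEC =====
-- Pre_ excludes histories containing an empty point, on which Python A raises IndexError at pt[-1]
def Pre_split_history (history : List (List (Option Int))) : Prop :=
  ∀ pt ∈ history, pt ≠ []
instance (history : List (List (Option Int))) : Decidable (Pre_split_history history) := by
  unfold Pre_split_history; infer_instance
def pvWitness_split_history : List (List (Option Int)) := [[some 1], [none], [some 2]]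

def Spec_split_history (history : List (List (Option Int))) (out : List (List (List (Option Int)))) : Prop := out = split_history_alt history
instance (history : List (List (Option Int))) (out : List (List (List (Option Int)))) : Decidable (Spec_split_history history out) := by unfold Spec_split_history; infer_instance

-- ===== CLAIM (what is proved, stated in full; the proofs are below) =====
def Claim_equal_split_history : Prop := ∀ (history : List (List (Option Int))), Dom_split_history history → Pre_split_history history → Spec_split_history history (split_history history)

-- ===== LEMMAS AND PROOFS =====

-- unfolding lemmas for pvGroupGo (one per shape of the list argument)
lemma pvGroupGo_nil (segs : List (List (List (Option Int)))) (seg : List (List (Option Int))) :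
    pvGroupGo segs seg [] = if seg.isEmpty then segs else segs ++ [seg] := by
  rw [pvGroupGo]

lemma pvGroupGo_cons_nongap (segs : List (List (List (Option Int))))
    (seg : List (List (Option Int))) (pt : List (Option Int)) (rest : List (List (Option Int)))
    (hpt : pvIsGap pt = false) :
    pvGroupGo segs seg (pt :: rest) =
      pvGroupGo segs (seg ++ (pt :: rest.takeWhile (fun q => pvIsGap q == false)))
        (rest.dropWhile (fun q => pvIsGap q == false)) := by
  rw [pvGroupGo]
  simp [hpt]

lemma pvGroupGo_cons_gap (segs : List (List (List (Option Int))))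
    (seg : List (List (Option Int))) (pt : List (Option Int)) (rest : List (List (Option Int)))
    (hpt : pvIsGap pt = true) :
    pvGroupGo segs seg (pt :: rest) =
      if (pt :: rest.takeWhile (fun q => pvIsGap q == true)).length > 10 && !seg.isEmpty
      then pvGroupGo (segs ++ [seg]) [] (rest.dropWhile (fun q => pvIsGap q == true))
      else pvGroupGo segs seg (rest.dropWhile (fun q => pvIsGap q == true)) := by
  rw [pvGroupGo]
  simp [hpt]

-- A's step on a gap point only increments the counter
lemma pvStepA_gap (segs : List (List (List (Option Int)))) (seg : List (List (Option Int)))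
    (c : Int) (pt : List (Option Int)) (h : pvIsGap pt = true) :
    pvStepA (segs, seg, c) pt = (segs, seg, c + 1) := by
  simp only [pvIsGap] at h
  simp [pvStepA, h]

-- folding A's step over a run of gap points only adds the run length to the counter
lemma pvFoldA_gap_run (l : List (List (Option Int))) (h : ∀ p ∈ l, pvIsGap p = true)
    (segs : List (List (List (Option Int)))) (seg : List (List (Option Int))) (c : Int) :
    l.foldl pvStepA (segs, seg, c) = (segs, seg, c + l.length) := by
  induction l generalizing c with
  | nil => simp
  | cons x xs ih =>
    rw [List.foldl_cons, pvStepA_gap _ _ _ _ (h x (by simp)),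
      ih (fun p hp => h p (List.mem_cons_of_mem _ hp))]
    simp only [List.length_cons]
    push_cast
    ring_nf

-- A's step on a non-gap point with counter ≤ 10 only appends the point
lemma pvStepA_nongap_small (segs : List (List (List (Option Int)))) (seg : List (List (Option Int)))
    (c : Int) (pt : List (Option Int)) (h : pvIsGap pt = false) (hc : ¬ c > 10) :
    pvStepA (segs, seg, c) pt = (segs, seg ++ [pt], 0) := by
  simp only [pvIsGap] at h
  simp [pvStepA, h, hc]

-- A's step on a non-gap point with counter > 10 flushes then appends
lemma pvStepA_nongap_big (segs : List (List (List (Option Int)))) (seg : List (List (Option Int)))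
    (c : Int) (pt : List (Option Int)) (h : pvIsGap pt = false) (hc : c > 10) :
    pvStepA (segs, seg, c) pt =
      ((if seg.isEmpty then segs else segs ++ [seg]), [pt], 0) := by
  simp only [pvIsGap] at h
  simp [pvStepA, h, hc]

-- absorbing one non-gap point into the pending segment commutes with B's run recursion
lemma pvGroupGo_snoc (segs : List (List (List (Option Int)))) (seg : List (List (Option Int)))
    (y : List (Option Int)) (ys : List (List (Option Int))) (hy : pvIsGap y = false) :
    pvGroupGo segs (seg ++ [y]) ys = pvGroupGo segs seg (y :: ys) := by
  rw [pvGroupGo_cons_nongap _ _ _ _ hy]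
  cases ys with
  | nil => simp
  | cons z zs =>
    cases hz : pvIsGap z with
    | false =>
      rw [pvGroupGo_cons_nongap _ _ _ _ hz]
      simp [hz, List.append_assoc]
    | true =>
      simp [hz]

-- master invariant: from a zero counter, A's loop + final flush equals B's run recursion
lemma pvMain (n : Nat) : ∀ (l : List (List (Option Int))), l.length ≤ n →
    ∀ (segs : List (List (List (Option Int)))) (seg : List (List (Option Int))),
    pvFinishA (l.foldl pvStepA (segs, seg, 0)) = pvGroupGo segs seg l := by
  induction n with
  | zero =>
    intro l hl segs seg
    rw [List.length_eq_zero_iff.mp (Nat.le_zero.mp hl), pvGroupGo_nil]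
    simp [pvFinishA]
  | succ n ih =>
    intro l hl segs seg
    cases l with
    | nil =>
      rw [pvGroupGo_nil]
      simp [pvFinishA]
    | cons x xs =>
      cases hx : pvIsGap x with
      | false =>
        -- non-gap head: one step, then the induction hypothesis plus the snoc lemma
        rw [List.foldl_cons, pvStepA_nongap_small _ _ _ _ hx (by omega),
          ih xs (by simpa using hl) segs (seg ++ [x]), pvGroupGo_snoc _ _ _ _ hx]
      | true =>
        -- gap head: split xs into the rest of the gap run and the remainder
        have hsplit : xs.takeWhile (fun q => pvIsGap q == true) ++
            xs.dropWhile (fun q => pvIsGap q == true) = xs :=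
          List.takeWhile_append_dropWhile
        have ht : ∀ p ∈ xs.takeWhile (fun q => pvIsGap q == true), pvIsGap p = true := by
          intro p hp
          simpa using List.mem_takeWhile_imp hp
        set t := xs.takeWhile (fun q => pvIsGap q == true) with htdef
        set r := xs.dropWhile (fun q => pvIsGap q == true) with hrdef
        have hfold : (x :: xs).foldl pvStepA (segs, seg, 0) =
            r.foldl pvStepA (segs, seg, (1 : Int) + t.length) := by
          rw [List.foldl_cons, pvStepA_gap _ _ _ _ hx, ← hsplit, List.foldl_append,
            pvFoldA_gap_run t ht]
          simp
        have hlen : r.length ≤ n := by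
          have h1 : t.length + r.length = xs.length := by
            rw [← List.length_append, hsplit]
          have h2 := hl
          simp only [List.length_cons] at h2
          omega
        rw [pvGroupGo_cons_gap _ _ _ _ hx, ← htdef, ← hrdef]
        cases hr : r with
        | nil =>
          rw [hfold, hr]
          simp only [List.foldl_nil]
          by_cases hseg : seg.isEmpty
          · have hcond : ((x :: t).length > 10 && !seg.isEmpty) = false := by simp [hseg]
            rw [hcond, if_neg (by simp), pvGroupGo_nil]
            simp [pvFinishA, hseg]
          · by_cases hbig : (x :: t).length > 10
            · have hcond : ((x :: t).length > 10 && !seg.isEmpty) = true := by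
                simp only [List.length_cons] at hbig
                simp [hseg]
                omega
              rw [hcond, if_pos rfl, pvGroupGo_nil]
              simp [pvFinishA, hseg]
            · have hcond : ((x :: t).length > 10 && !seg.isEmpty) = false := by
                simp only [Bool.and_eq_false_iff]
                left
                simpa using hbig
              rw [hcond, if_neg (by simp), pvGroupGo_nil]
              simp [pvFinishA, hseg]
        | cons y ys =>
          have hy : pvIsGap y = false := by
            have hh := List.head?_dropWhile_not (fun q => pvIsGap q == true) xs
            rw [← hrdef, hr] at hh
            simpa using hh
          have hylen : ys.length ≤ n := by
            rw [hr] at hlen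
            simp only [List.length_cons] at hlen
            omega
          rw [hfold, hr, List.foldl_cons]
          by_cases hbig : (1 : Int) + t.length > 10
          · rw [pvStepA_nongap_big _ _ _ _ hy hbig]
            have hbigN : (x :: t).length > 10 := by
              simp only [List.length_cons]
              omega
            by_cases hseg : seg.isEmpty
            · have h0 : seg = [] := List.isEmpty_iff.mp hseg
              subst h0
              have hcond : ((x :: t).length > 10 && !List.isEmpty ([] : List (List (Option Int)))) = false := by
                simp
              rw [hcond]
              simp only [List.isEmpty_nil, if_true, Bool.false_eq_true, if_false]
              rw [ih ys hylen segs [y]]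
              simpa using pvGroupGo_snoc segs [] y ys hy
            · have hcond : ((x :: t).length > 10 && !seg.isEmpty) = true := by
                simp only [List.length_cons] at hbigN
                simp [hseg]
                omega
              rw [hcond]
              rw [if_neg hseg, ih ys hylen (segs ++ [seg]) [y]]
              simpa using pvGroupGo_snoc (segs ++ [seg]) [] y ys hy
          · rw [pvStepA_nongap_small _ _ _ _ hy hbig]
            have hcond : ((x :: t).length > 10 && !seg.isEmpty) = false := by
              simp only [Bool.and_eq_false_iff]
              left
              simp only [List.length_cons]
              simp only [decide_eq_false_iff_not]
              omega
            rw [hcond, if_neg (by simp),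
              ih ys hylen segs (seg ++ [y]), pvGroupGo_snoc _ _ _ _ hy]

-- ===== VERDICT (by name: the statement is the Claim_ definition above) =====
theorem split_history_spec : Claim_equal_split_history := by
  intro history _ _
  unfold Spec_split_history split_history split_history_alt
  exact pvMain history.length history le_rfl [] []
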